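-- pv_equiv track=rewrite | github.com/altaafackbar/projects | Email Database Search/EmailSearch.py | reformatSpaces
-- ===== SOURCE A (Python) =====
-- def reformatSpaces(query):
--     # replace multiple spaces with just one
--     query = query.split()
--     query = " ".join(query)
--
--     # remove spaces between :,<,> and terms
--     ops = [":", "<", ">","="]
--     rebuiltString = ""
--     for i in range(0, len(query)):
--         if query[i] != " ":
--             rebuiltString += query[i]
--         elif query[i] == " " and query[i-1] not in ops and query[i+1] not in ops:
--             rebuiltString += query[i]
--
--     return rebuiltString
-- ===== SOURCE B (Python) =====
-- def reformatSpaces(query):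
--     # token-level rebuild: join split() tokens, separating two tokens by a
--     # space only when neither the char before the gap nor the char after it
--     # is one of the operators : < > =
--     ops = ":<>="
--     out = ""
--     for t in query.split():
--         if out and out[-1] not in ops and t[0] not in ops:
--             out += " "
--         out += t
--     return out
-- ===== Notes on version B (the rewrite author's own statement) =====
-- stated objective: faster
-- what changed: Instead of joining the split tokens and re-scanning the joined string character by character with query[i-1]/query[i+1] lookarounds, B folds once directly over the split() tokens and decides per gap whether to emit the separating space (skipped when the previous output char or the token's first char is an operator).
import Mathlib
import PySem

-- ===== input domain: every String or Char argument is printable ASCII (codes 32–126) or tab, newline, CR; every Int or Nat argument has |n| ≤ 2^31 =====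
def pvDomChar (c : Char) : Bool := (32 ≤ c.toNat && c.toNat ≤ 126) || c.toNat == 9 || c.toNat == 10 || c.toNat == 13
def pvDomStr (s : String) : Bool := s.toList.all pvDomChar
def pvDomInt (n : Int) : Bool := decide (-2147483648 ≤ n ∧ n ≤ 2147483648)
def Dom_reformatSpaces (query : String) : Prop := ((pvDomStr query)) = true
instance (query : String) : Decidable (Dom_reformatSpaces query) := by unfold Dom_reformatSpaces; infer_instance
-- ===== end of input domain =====

-- B rebuilds the query token-by-token from split() instead of re-scanning the joined string
-- char-by-char with index lookarounds (objective: faster, measured).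


-- ===== PORT A =====
-- ops = [":", "<", ">", "="]
def opsA : List Char := [':', '<', '>', '=']

-- literal transliteration of A: collapse whitespace with split/join, then loop
-- 'for i in range(0, len(query))' rebuilding the string with query[i-1]/query[i+1] lookarounds.
-- The 'none => acc' arms mark Python IndexError points; they are unreachable because the
-- joined string never starts or ends with a space (and query[i-1] wraps to the last char at i = 0).
def reformatSpaces (query : String) : String :=
  let q : List Char := PySem.Chars.join " ".toList (PySem.Chars.split₀ query.toList)
  let rebuilt : List Char :=
    (PySem.List.pyRange 0 (q.length : Int) 1).foldl (fun acc i =>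
      match PySem.List.pyGet? q i with
      | none => acc
      | some c =>
        if c ≠ ' ' then acc ++ [c]
        else
          match PySem.List.pyGet? q (i - 1) with
          | none => acc
          | some p =>
            if p ∈ opsA then acc
            else
              match PySem.List.pyGet? q (i + 1) with
              | none => acc
              | some nx => if nx ∈ opsA then acc else acc ++ [c]) []
  String.ofList rebuilt

-- ===== PORT B =====
-- ops = ":<>=" (a string in Source B; ported as its list of characters)
def opsB : List Char := [':', '<', '>', '=']

-- literal transliteration of B: one fold over query.split(); insert the separating space
-- only when out is nonempty and neither out[-1] nor t[0] is an operator, then append t.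
def reformatSpaces_alt (query : String) : String :=
  let out : List Char :=
    (PySem.Chars.split₀ query.toList).foldl (fun out t =>
      if out ≠ [] ∧ PySem.List.pyGetD out (-1) ' ' ∉ opsB ∧ PySem.List.pyGetD t 0 ' ' ∉ opsB
      then out ++ [' '] ++ t
      else out ++ t) []
  String.ofList out

-- ===== PRECONDITION & SPEC =====
def Spec_reformatSpaces (query : String) (out : String) : Prop := out = reformatSpaces_alt query
instance (query : String) (out : String) : Decidable (Spec_reformatSpaces query out) := by unfold Spec_reformatSpaces; infer_instance

-- ===== CLAIM (what is proved, stated in full; the proofs are below) =====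
def Claim_equal_reformatSpaces : Prop := ∀ (query : String), Dom_reformatSpaces query → Spec_reformatSpaces query (reformatSpaces query)

-- ===== LEMMAS AND PROOFS =====

-- A's character loop as a structural recursion carrying the previous character.
def goA (prev : Char) : List Char → List Char
  | [] => []
  | c :: rest =>
    if c ≠ ' ' then c :: goA c rest
    else if prev ∈ opsA then goA c rest
    else
      match rest with
      | [] => goA c rest
      | nx :: _ => if nx ∈ opsA then goA c rest else c :: goA c rest

-- split() produces nonempty, space-free tokens.
def goodToks (toks : List (List Char)) : Prop :=
  ∀ t ∈ toks, t ≠ [] ∧ ∀ c ∈ t, c ≠ ' '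

theorem go_good (s cur : List Char) (acc : List (List Char))
    (hcur : ∀ c ∈ cur, c ≠ ' ') (hacc : goodToks acc) :
    goodToks (PySem.Chars.split₀.go s cur acc) := by
  induction s generalizing cur acc with
  | nil =>
    intro t ht
    simp only [PySem.Chars.split₀.go] at ht
    by_cases hcE : cur.isEmpty
    · rw [if_pos hcE, List.mem_reverse] at ht; exact hacc t ht
    · rw [if_neg hcE, List.mem_reverse, List.mem_cons] at ht
      rcases ht with rfl | ht
      · have hcne : cur ≠ [] := by simpa using hcE
        exact ⟨by simpa using hcne, fun x hx => hcur x (List.mem_reverse.mp hx)⟩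
      · exact hacc t ht
  | cons c rest ih =>
    simp only [PySem.Chars.split₀.go]
    by_cases hsp : PySem.Chars.isspace c
    · rw [if_pos hsp]
      by_cases hcE : cur.isEmpty
      · rw [if_pos hcE]; exact ih [] acc (by simp) hacc
      · rw [if_neg hcE]
        refine ih [] (cur.reverse :: acc) (by simp) ?_
        intro t ht
        rcases List.mem_cons.mp ht with rfl | ht
        · have hcne : cur ≠ [] := by simpa using hcE
          exact ⟨by simpa using hcne, fun x hx => hcur x (List.mem_reverse.mp hx)⟩
        · exact hacc t ht
    · rw [if_neg hsp]
      refine ih (c :: cur) acc ?_ hacc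
      intro x hx
      rcases List.mem_cons.mp hx with rfl | hx
      · intro h; subst h; exact hsp (by decide)
      · exact hcur x hx

theorem split₀_good (cs : List Char) : goodToks (PySem.Chars.split₀ cs) :=
  go_good cs [] [] (by simp) (by intro t ht; simp at ht)

theorem intercalate_space (t : List Char) (rest : List (List Char)) :
    PySem.Chars.join [' '] (t :: rest) = t ++ (rest.map (fun u => ' ' :: u)).flatten := by
  induction rest generalizing t with
  | nil => simp [PySem.Chars.join_singleton]
  | cons u rest ih =>
    rw [PySem.Chars.join_cons_cons, ih]
    simp

-- goA copies a space-free block unchanged and ends up carrying its last char as prev.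
theorem tok_pass (t : List Char) (ht : ∀ c ∈ t, c ≠ ' ') (prev : Char) (rest : List Char) :
    goA prev (t ++ rest) = t ++ goA (t.getLastD prev) rest := by
  induction t generalizing prev with
  | nil => simp
  | cons c t' ih =>
    have hc : c ≠ ' ' := ht c (by simp)
    simp only [List.cons_append, goA, if_pos hc, List.getLastD_cons]
    rw [ih (fun x hx => ht x (by simp [hx]))]

-- A's indexed fold from position a equals goA on the suffix, prev being q[a-1].
theorem foldA_aux (q : List Char) (n a : Nat) (hn : n = q.length - a) (ha : a ≤ q.length)
    (acc : List Char)
    (prev : Char) (hprev : PySem.List.pyGet? q ((a : Int) - 1) = some prev) :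
    ((PySem.List.pyRange a (q.length : Int) 1).foldl (fun acc i =>
      match PySem.List.pyGet? q i with
      | none => acc
      | some c =>
        if c ≠ ' ' then acc ++ [c]
        else
          match PySem.List.pyGet? q (i - 1) with
          | none => acc
          | some p =>
            if p ∈ opsA then acc
            else
              match PySem.List.pyGet? q (i + 1) with
              | none => acc
              | some nx => if nx ∈ opsA then acc else acc ++ [c]) acc)
      = acc ++ goA prev (q.drop a) := by
  induction n generalizing a acc prev with
  | zero =>
    have haq : a = q.length := by omega
    subst haq
    rw [PySem.List.pyRange_one_eq_nil (by omega), List.drop_length]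
    simp [goA]
  | succ n ih =>
    have halt : a < q.length := by omega
    rw [PySem.List.pyRange_one_cons (by exact_mod_cast halt), List.foldl_cons]
    have hget : PySem.List.pyGet? q (a : Int) = some q[a] := by
      rw [PySem.List.pyGet?_natCast, List.getElem?_eq_getElem halt]
    have hdrop : q.drop a = q[a] :: q.drop (a + 1) := (List.getElem_cons_drop halt).symm
    have hcast : (a : Int) + 1 = ((a + 1 : Nat) : Int) := by push_cast; ring
    have hprev' : PySem.List.pyGet? q (((a + 1 : Nat) : Int) - 1) = some q[a] := by
      have : ((a + 1 : Nat) : Int) - 1 = (a : Int) := by push_cast; ring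
      rw [this, hget]
    rw [hget, hcast]
    dsimp only
    by_cases hc : q[a] ≠ ' '
    · rw [if_pos hc, ih (a + 1) (by omega) (by omega) _ _ hprev']
      rw [hdrop]
      simp [goA, hc]
    · rw [if_neg hc]
      rw [not_not] at hc
      have hprevget : PySem.List.pyGet? q ((a : Int) - 1) = some prev := hprev
      rw [hprevget]
      dsimp only
      by_cases hp : prev ∈ opsA
      · rw [if_pos hp, ih (a + 1) (by omega) (by omega) _ _ hprev']
        rw [hdrop]
        simp [goA, hc, hp]
      · rw [if_neg hp]
        by_cases hlast : a + 1 < q.length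
        · have hnx : PySem.List.pyGet? q (((a + 1 : Nat) : Int)) = some q[a + 1] := by
            rw [PySem.List.pyGet?_natCast, List.getElem?_eq_getElem hlast]
          rw [hnx]
          dsimp only
          have hdrop2 : q.drop (a + 1) = q[a + 1] :: q.drop (a + 2) :=
            (List.getElem_cons_drop hlast).symm
          by_cases hnxo : q[a + 1] ∈ opsA
          · rw [if_pos hnxo, ih (a + 1) (by omega) (by omega) _ _ hprev']
            rw [hdrop, hdrop2]
            simp [goA, hc, hp, hnxo]
          · rw [if_neg hnxo, ih (a + 1) (by omega) (by omega) _ _ hprev']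
            rw [hdrop, hdrop2]
            simp [goA, hc, hp, hnxo]
        · have hlen : a + 1 = q.length := by omega
          have hnx : PySem.List.pyGet? q (((a + 1 : Nat) : Int)) = none := by
            rw [PySem.List.pyGet?_natCast, List.getElem?_eq_none_iff.mpr (by omega)]
          rw [hnx, ih (a + 1) (by omega) (by omega) _ _ hprev']
          have hdrop2 : q.drop (a + 1) = [] := by rw [hlen, List.drop_length]
          rw [hdrop, hdrop2]
          simp [goA, hc, hp]

-- B's token fold equals goA on the space-prefixed flattening of the remaining tokens.
theorem B_fold_eq (rest : List (List Char)) (hg : goodToks rest)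
    (out : List Char) (hout : out ≠ []) :
    (rest.foldl (fun out t =>
      if out ≠ [] ∧ PySem.List.pyGetD out (-1) ' ' ∉ opsB ∧ PySem.List.pyGetD t 0 ' ' ∉ opsB
      then out ++ [' '] ++ t
      else out ++ t) out)
      = out ++ goA (out.getLast hout) ((rest.map (fun u => ' ' :: u)).flatten) := by
  induction rest generalizing out with
  | nil => simp [goA]
  | cons t rest' ih =>
    obtain ⟨htne, htsp⟩ := hg t (by simp)
    obtain ⟨h0, t''⟩ : ∃ h0 t'', t = h0 :: t'' := by
      cases t with | nil => exact absurd rfl htne | cons a b => exact ⟨a, b, rfl⟩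
    obtain ⟨t'', rfl⟩ := t''
    have hg' : goodToks rest' := fun u hu => hg u (by simp [hu])
    have hlastout : PySem.List.pyGetD out (-1) ' ' = out.getLast hout :=
      PySem.List.pyGetD_neg_one out ' ' hout
    have hheadt : PySem.List.pyGetD (h0 :: t'') 0 ' ' = h0 := PySem.List.pyGetD_zero_cons h0 t'' ' '
    rw [List.foldl_cons]
    by_cases hp : out.getLast hout ∈ opsA
    · have hcond : ¬ (out ≠ [] ∧ PySem.List.pyGetD out (-1) ' ' ∉ opsB ∧
          PySem.List.pyGetD (h0 :: t'') 0 ' ' ∉ opsB) := by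
        rw [hlastout]; intro h; exact h.2.1 hp
      rw [if_neg hcond]
      have hne2 : out ++ h0 :: t'' ≠ [] := by simp
      rw [ih hg' _ hne2]
      have hlast2 : (out ++ h0 :: t'').getLast hne2 = (h0 :: t'').getLast (by simp) := by
        exact List.getLast_append_of_ne_nil _ (by simp)
      rw [hlast2]
      simp only [List.map_cons, List.flatten_cons]
      rw [show (' ' :: (h0 :: t'')) ++ (rest'.map (fun u => ' ' :: u)).flatten
            = ' ' :: ((h0 :: t'') ++ (rest'.map (fun u => ' ' :: u)).flatten) by simp]
      rw [show goA (out.getLast hout) (' ' :: ((h0 :: t'') ++ (rest'.map (fun u => ' ' :: u)).flatten))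
            = goA ' ' ((h0 :: t'') ++ (rest'.map (fun u => ' ' :: u)).flatten) by
        simp [goA, hp]]
      rw [tok_pass _ htsp]
      have : (h0 :: t'').getLastD ' ' = (h0 :: t'').getLast (by simp) := by
        simp [List.getLastD_eq_getLast?, List.getLast?_eq_some_getLast]
      rw [this]
      simp
    · by_cases hh : h0 ∈ opsA
      · have hcond : ¬ (out ≠ [] ∧ PySem.List.pyGetD out (-1) ' ' ∉ opsB ∧
            PySem.List.pyGetD (h0 :: t'') 0 ' ' ∉ opsB) := by
          rw [hheadt]; intro h; exact h.2.2 hh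
        rw [if_neg hcond]
        have hne2 : out ++ h0 :: t'' ≠ [] := by simp
        rw [ih hg' _ hne2]
        have hlast2 : (out ++ h0 :: t'').getLast hne2 = (h0 :: t'').getLast (by simp) :=
          List.getLast_append_of_ne_nil _ (by simp)
        rw [hlast2]
        simp only [List.map_cons, List.flatten_cons]
        rw [show (' ' :: (h0 :: t'')) ++ (rest'.map (fun u => ' ' :: u)).flatten
              = ' ' :: ((h0 :: t'') ++ (rest'.map (fun u => ' ' :: u)).flatten) by simp]
        rw [show goA (out.getLast hout) (' ' :: ((h0 :: t'') ++ (rest'.map (fun u => ' ' :: u)).flatten))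
              = goA ' ' ((h0 :: t'') ++ (rest'.map (fun u => ' ' :: u)).flatten) by
          simp [goA, hp, hh]]
        rw [tok_pass _ htsp]
        have : (h0 :: t'').getLastD ' ' = (h0 :: t'').getLast (by simp) := by
          simp [List.getLastD_eq_getLast?, List.getLast?_eq_some_getLast]
        rw [this]
        simp
      · have hcond : (out ≠ [] ∧ PySem.List.pyGetD out (-1) ' ' ∉ opsB ∧
            PySem.List.pyGetD (h0 :: t'') 0 ' ' ∉ opsB) := by
          rw [hlastout, hheadt]; exact ⟨hout, hp, hh⟩
        rw [if_pos hcond]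
        have hne2 : out ++ [' '] ++ h0 :: t'' ≠ [] := by simp
        rw [ih hg' _ hne2]
        have hlast2 : (out ++ [' '] ++ h0 :: t'').getLast hne2 = (h0 :: t'').getLast (by simp) := by
          apply Option.some.inj
          rw [← List.getLast?_eq_some_getLast, ← List.getLast?_eq_some_getLast]
          exact List.getLast?_append_of_ne_nil _ (by simp)
        rw [hlast2]
        simp only [List.map_cons, List.flatten_cons]
        rw [show (' ' :: (h0 :: t'')) ++ (rest'.map (fun u => ' ' :: u)).flatten
              = ' ' :: ((h0 :: t'') ++ (rest'.map (fun u => ' ' :: u)).flatten) by simp]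
        rw [show goA (out.getLast hout) (' ' :: ((h0 :: t'') ++ (rest'.map (fun u => ' ' :: u)).flatten))
              = ' ' :: goA ' ' ((h0 :: t'') ++ (rest'.map (fun u => ' ' :: u)).flatten) by
          simp [goA, hp, hh]]
        rw [tok_pass _ htsp]
        have : (h0 :: t'').getLastD ' ' = (h0 :: t'').getLast (by simp) := by
          simp [List.getLastD_eq_getLast?, List.getLast?_eq_some_getLast]
        rw [this]
        simp

-- ===== VERDICT (by name: the statement is the Claim_ definition above) =====
theorem reformatSpaces_spec : Claim_equal_reformatSpaces := by
  intro query _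
  unfold Spec_reformatSpaces reformatSpaces reformatSpaces_alt
  have hsep : " ".toList = [' '] := rfl
  rw [hsep]
  have hg := split₀_good query.toList
  cases htk : PySem.Chars.split₀ query.toList with
  | nil =>
    simp [PySem.Chars.join, PySem.List.pyRange_one_eq_nil]
  | cons t0 rest =>
    rw [htk] at hg
    dsimp only
    obtain ⟨ht0ne, ht0sp⟩ := hg t0 (by simp)
    have hg' : goodToks rest := fun u hu => hg u (by simp [hu])
    have hq : PySem.Chars.join [' '] (t0 :: rest)
        = t0 ++ (rest.map (fun u => ' ' :: u)).flatten := intercalate_space t0 rest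
    set q : List Char := PySem.Chars.join [' '] (t0 :: rest) with hqdef
    have hqne : q ≠ [] := by
      rw [hq]
      cases t0 with | nil => exact absurd rfl ht0ne | cons a b => simp
    have hprev : PySem.List.pyGet? q ((0 : Nat) - 1 : Int) = some (q.getLast hqne) := by
      rw [show ((0 : Nat) - 1 : Int) = -1 by norm_num, PySem.List.pyGet?_neg_one,
        List.getLast?_eq_some_getLast]
    have hA := foldA_aux q q.length 0 (by omega) (by omega) [] (q.getLast hqne) hprev
    rw [show ((0 : Nat) : Int) = 0 by norm_num] at hA
    rw [hA, List.drop_zero, List.nil_append]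
    -- B side
    rw [List.foldl_cons]
    rw [if_neg (by intro h; exact h.1 rfl), List.nil_append]
    rw [B_fold_eq rest hg' t0 ht0ne]
    -- A side: split q into its first token and the rest
    generalize q.getLast hqne = pv
    rw [hq, tok_pass t0 ht0sp]
    have : t0.getLastD pv = t0.getLast ht0ne := by
      cases t0 with
      | nil => exact absurd rfl ht0ne
      | cons a b => simp [List.getLastD_eq_getLast?, List.getLast?_eq_some_getLast]
    rw [this]
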